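-- pv_equiv track=rewrite | github.com/Dankerbadge/betting-bot | betbot/kalshi_mlb_map.py | _find_team_participant_name
-- ===== SOURCE A (Python) =====
-- from typing import Any
--
-- def _full_team_name(team: dict[str, Any]) -> str:
--     city = str(team.get("name") or "").strip()
--     mascot = str(team.get("mascot") or "").strip()
--     return " ".join(part for part in [city, mascot] if part).strip()
--
-- def _find_team_participant_name(team: dict[str, Any], participant_names: list[str]) -> str | None:
--     full_name = _full_team_name(team).lower()
--     mascot = str(team.get("mascot") or "").strip().lower()
--     for participant_name in participant_names:
--         lowered = participant_name.lower()
--         if lowered == full_name: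
--             return participant_name
--     for participant_name in participant_names:
--         lowered = participant_name.lower()
--         if mascot and mascot in lowered:
--             return participant_name
--     return None
-- ===== SOURCE B (Python) =====
-- def _find_team_participant_name(team, participant_names):
--     city = str(team.get("name") or "").strip()
--     mascot_raw = str(team.get("mascot") or "").strip()
--     full_name = " ".join(p for p in [city, mascot_raw] if p).strip().lower()
--     mascot = mascot_raw.lower()
--     candidate = None
--     for participant_name in participant_names:
--         lowered = participant_name.lower()
--         if lowered == full_name:
--             return participant_name
--         if candidate is None and mascot and mascot in lowered:
--             candidate = participant_name
--     return candidate
-- ===== Notes on version B (the rewrite author's own statement) =====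
-- stated objective: simpler
-- what changed: Replaced A's two full scans of participant_names by a single loop that returns immediately on an exact match and remembers the first mascot-substring candidate for the end.
import Mathlib
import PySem

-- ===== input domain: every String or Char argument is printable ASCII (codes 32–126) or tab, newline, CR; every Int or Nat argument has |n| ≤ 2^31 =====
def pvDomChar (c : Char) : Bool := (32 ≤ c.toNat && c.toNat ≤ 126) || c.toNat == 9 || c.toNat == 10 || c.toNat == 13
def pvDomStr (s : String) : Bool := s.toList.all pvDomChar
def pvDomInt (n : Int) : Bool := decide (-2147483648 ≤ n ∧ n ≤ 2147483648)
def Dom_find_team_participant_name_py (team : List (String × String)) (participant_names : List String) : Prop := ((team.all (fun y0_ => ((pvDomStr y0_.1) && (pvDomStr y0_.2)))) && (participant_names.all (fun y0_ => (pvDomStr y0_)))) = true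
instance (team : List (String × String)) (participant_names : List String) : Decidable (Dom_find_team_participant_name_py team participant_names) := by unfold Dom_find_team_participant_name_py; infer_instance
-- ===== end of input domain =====

-- B merges A's two scans of participant_names into one loop that returns an exact match
-- immediately and keeps the first mascot-substring candidate for after the loop (objective: simpler).

-- ===== PORT A =====
-- team.get(k) or "" : first-match association-list lookup, "" if absent
def pvGetStr (team : List (String × String)) (k : String) : String :=
  ((team.find? (fun p => p.1 == k)).map (fun p => p.2)).getD ""

-- _full_team_name
def pvFullTeamName (team : List (String × String)) : String :=
  let city := PySem.Str.strip (pvGetStr team "name")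
  let mascot := PySem.Str.strip (pvGetStr team "mascot")
  PySem.Str.strip (PySem.Str.join " " (([city, mascot]).filter (fun part => part != "")))

def find_team_participant_name_py (team : List (String × String)) (participant_names : List String) : Option String :=
  let full_name := PySem.Str.lower (pvFullTeamName team)
  let mascot := PySem.Str.lower (PySem.Str.strip (pvGetStr team "mascot"))
  -- first loop: exact match, early return
  match participant_names.find? (fun p => PySem.Str.lower p == full_name) with
  | some p => some p
  | none =>
    -- second loop: mascot substring, early return; falls through to None
    participant_names.find? (fun p => mascot != "" && PySem.Str.isIn mascot (PySem.Str.lower p))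

-- ===== PORT B =====
def pvAltLoop (full_name mascot : String) : List String → Option String → Option String
  | [], cand => cand
  | p :: rest, cand =>
    let lowered := PySem.Str.lower p
    if lowered == full_name then some p
    else if cand.isNone && (mascot != "" && PySem.Str.isIn mascot lowered) then
      pvAltLoop full_name mascot rest (some p)
    else pvAltLoop full_name mascot rest cand

def find_team_participant_name_py_alt (team : List (String × String)) (participant_names : List String) : Option String :=
  let city := PySem.Str.strip (pvGetStr team "name")
  let mascot_raw := PySem.Str.strip (pvGetStr team "mascot")
  let full_name := PySem.Str.lower (PySem.Str.strip (PySem.Str.join " " (([city, mascot_raw]).filter (fun part => part != ""))))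
  let mascot := PySem.Str.lower mascot_raw
  pvAltLoop full_name mascot participant_names none

-- ===== PRECONDITION & SPEC =====
def Spec_find_team_participant_name_py (team : List (String × String)) (participant_names : List String) (out : Option String) : Prop := out = find_team_participant_name_py_alt team participant_names
instance (team : List (String × String)) (participant_names : List String) (out : Option String) : Decidable (Spec_find_team_participant_name_py team participant_names out) := by unfold Spec_find_team_participant_name_py; infer_instance

-- ===== CLAIM (what is proved, stated in full; the proofs are below) =====
def Claim_equal_find_team_participant_name_py : Prop := ∀ (team : List (String × String)) (participant_names : List String), Dom_find_team_participant_name_py team participant_names → Spec_find_team_participant_name_py team participant_names (find_team_participant_name_py team participant_names)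

-- ===== LEMMAS AND PROOFS =====
theorem pvAltLoop_eq (full_name mascot : String) (xs : List String) (cand : Option String) :
    pvAltLoop full_name mascot xs cand =
      ((xs.find? (fun p => PySem.Str.lower p == full_name)).orElse
        (fun _ => cand.orElse
          (fun _ => xs.find? (fun p => mascot != "" && PySem.Str.isIn mascot (PySem.Str.lower p))))) := by
  induction xs generalizing cand with
  | nil => cases cand <;> rfl
  | cons p rest ih =>
    simp only [pvAltLoop, List.find?_cons]
    cases h1 : (PySem.Str.lower p == full_name) with
    | true => cases cand <;> simp [Option.orElse]
    | false =>
      simp only [Bool.false_eq_true, if_false]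
      cases hY : (mascot != "" && PySem.Str.isIn mascot (PySem.Str.lower p)) with
      | true =>
        cases cand with
        | none =>
          simp only [Option.isNone_none, Bool.true_and, ih]
          cases List.find? (fun q => PySem.Str.lower q == full_name) rest <;>
            simp [Option.orElse]
        | some c =>
          simp only [Option.isNone_some, Bool.false_and, Bool.false_eq_true, if_false, ih]
          cases List.find? (fun q => PySem.Str.lower q == full_name) rest <;>
            simp [Option.orElse]
      | false =>
        simp only [hY, Bool.and_false, Bool.false_eq_true, if_false, ih]

theorem pvMatchOrElse (o y : Option String) :
    (match o with | some p => some p | none => y) =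
      (o.orElse (fun _ => Option.orElse none (fun _ => y))) := by
  cases o <;> rfl

-- ===== VERDICT (by name: the statement is the Claim_ definition above) =====
theorem find_team_participant_name_py_spec : Claim_equal_find_team_participant_name_py := by
  intro team participant_names _
  unfold Spec_find_team_participant_name_py find_team_participant_name_py find_team_participant_name_py_alt pvFullTeamName
  rw [pvAltLoop_eq]
  exact pvMatchOrElse _ _
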